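-- pv_equiv track=rewrite | github.com/Octoberr/sspywork | savecode/threeyears/idownclient/spider/spidersocial/spidermessenger/messengerbase.py | _parse_js_one_v1
-- ===== SOURCE A (Python) =====
-- def _parse_js_one_v1(js_one: str):
--     """处理ajax请求返回的js， 字符串参数转换成列表"""
--     param_list = [i.strip() for i in js_one.split(',')]
--     my_list = []
--     temp = ''
--     for param in param_list:
--         if temp == '':
--             if param.startswith('"'):
--                 if not param.endswith('"') or param.endswith('\\"'):
--                     temp = param
--                     continue
--             my_list.append(param)
--         else:
--             temp += ","
--             temp += param
--             if param.endswith('"') and not param.endswith('\\"'):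
--                 my_list.append(temp)
--                 temp = ''
--                 continue
--     return my_list
-- ===== SOURCE B (Python) =====
-- def _parse_js_one_v1(js_one: str):
--     """处理ajax请求返回的js， 字符串参数转换成列表"""
--     pieces = [p.strip() for p in js_one.split(',')]
--     n = len(pieces)
--
--     def closes(p):
--         return p.endswith('"') and not p.endswith('\\"')
--
--     out = []
--     i = 0
--     while i < n:
--         p = pieces[i]
--         if p.startswith('"') and not closes(p):
--             # unterminated opening quote: absorb following pieces up to the closer
--             sub = [p]
--             i += 1
--             while i < n and not closes(pieces[i]):
--                 sub.append(pieces[i])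
--                 i += 1
--             if i < n:
--                 sub.append(pieces[i])
--                 out.append(','.join(sub))
--                 i += 1
--             # else: no closer until the end -> the dangling group is dropped
--         else:
--             out.append(p)
--             i += 1
--     return out
-- ===== Notes on version B (the rewrite author's own statement) =====
-- stated objective: alternative
-- what changed: Replaces A's temp-string/flag state machine (one foldl carrying a growing accumulator string) by an index-style outer loop with an explicit inner scan that gathers an unterminated quoted group into a sublist and joins it with commas once; a dangling group with no closer is dropped when the inner scan runs off the end.
import Mathlib
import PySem

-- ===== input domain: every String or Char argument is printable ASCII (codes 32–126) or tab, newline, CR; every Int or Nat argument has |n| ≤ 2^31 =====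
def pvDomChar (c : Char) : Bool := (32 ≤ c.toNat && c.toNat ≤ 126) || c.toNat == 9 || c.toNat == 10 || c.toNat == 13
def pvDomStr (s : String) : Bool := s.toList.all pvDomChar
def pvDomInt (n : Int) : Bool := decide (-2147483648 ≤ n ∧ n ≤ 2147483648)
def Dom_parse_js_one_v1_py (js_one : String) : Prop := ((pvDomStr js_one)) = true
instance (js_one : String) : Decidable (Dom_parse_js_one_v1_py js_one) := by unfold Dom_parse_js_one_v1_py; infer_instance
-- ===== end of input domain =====

-- B replaces A's temp/flag state machine by an index-style scan with an explicit inner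
-- loop that gathers an unterminated quoted group and joins it once (objective: alternative).

-- ===== PORT A =====
-- one step of A's for-loop: state = (my_list, temp)
def pvStepA (st : List String × String) (param : String) : List String × String :=
  if st.2 = "" then
    if PySem.Str.startswith param "\"" &&
       (!PySem.Str.endswith param "\"" || PySem.Str.endswith param "\\\"") then
      (st.1, param)
    else
      (st.1 ++ [param], st.2)
  else
    let temp := st.2 ++ "," ++ param
    if PySem.Str.endswith param "\"" && !PySem.Str.endswith param "\\\"" then
      (st.1 ++ [temp], "")
    else
      (st.1, temp)

def parse_js_one_v1_py (js_one : String) : List String :=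
  let param_list := ((PySem.Str.split? js_one ",").getD []).map PySem.Str.strip
  (param_list.foldl pvStepA ([], "")).1

-- ===== PORT B =====
def pvCloses (p : String) : Bool :=
  PySem.Str.endswith p "\"" && !PySem.Str.endswith p "\\\""

-- Source B's inner while loop: collect pieces up to and including the closing one;
-- none = it ran off the end without a closer
def pvCollect : List String → Option (List String × List String)
  | [] => none
  | q :: qs =>
    if pvCloses q then some ([q], qs)
    else
      match pvCollect qs with
      | none => none
      | some (sub, rest) => some (q :: sub, rest)

theorem pvCollect_length {l : List String} {sub rest : List String}
    (h : pvCollect l = some (sub, rest)) : rest.length < l.length := by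
  induction l generalizing sub rest with
  | nil => simp [pvCollect] at h
  | cons q qs ih =>
    unfold pvCollect at h
    split at h
    · simp_all
    · cases hc : pvCollect qs with
      | none => rw [hc] at h; simp at h
      | some pr =>
        rw [hc] at h
        obtain ⟨s', r'⟩ := pr
        simp only [Option.some.injEq, Prod.mk.injEq] at h
        obtain ⟨-, h2⟩ := h
        subst h2
        have := ih hc
        simp
        omega

-- Source B's outer while loop over the remaining pieces
def pvAltLoop : List String → List String
  | [] => []
  | p :: rest =>
    if PySem.Str.startswith p "\"" && !pvCloses p then
      match h : pvCollect rest with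
      | none => []
      | some (sub, rest') => PySem.Str.join "," (p :: sub) :: pvAltLoop rest'
    else
      p :: pvAltLoop rest
  termination_by l => l.length
  decreasing_by · simp; exact Nat.le_of_lt (pvCollect_length h)
                · simp

def parse_js_one_v1_py_alt (js_one : String) : List String :=
  let pieces := ((PySem.Str.split? js_one ",").getD []).map PySem.Str.strip
  pvAltLoop pieces

-- ===== PRECONDITION & SPEC =====
def Spec_parse_js_one_v1_py (js_one : String) (out : List String) : Prop := out = parse_js_one_v1_py_alt js_one
instance (js_one : String) (out : List String) : Decidable (Spec_parse_js_one_v1_py js_one out) := by unfold Spec_parse_js_one_v1_py; infer_instance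

-- ===== CLAIM (what is proved, stated in full; the proofs are below) =====
def Claim_equal_parse_js_one_v1_py : Prop := ∀ (js_one : String), Dom_parse_js_one_v1_py js_one → Spec_parse_js_one_v1_py js_one (parse_js_one_v1_py js_one)

-- ===== LEMMAS AND PROOFS =====

theorem pv_join_step (a b : String) (l : List String) :
    PySem.Str.join "," (a :: b :: l) = PySem.Str.join "," ((a ++ "," ++ b) :: l) := by
  apply String.toList_injective
  cases l with
  | nil => simp [PySem.Str.toList_join, PySem.Chars.join_cons_cons, PySem.Chars.join_singleton]
  | cons c l' => simp [PySem.Str.toList_join, PySem.Chars.join_cons_cons]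

theorem pv_join_single (a : String) : PySem.Str.join "," [a] = a := by
  apply String.toList_injective
  simp [PySem.Str.toList_join, PySem.Chars.join_singleton]

theorem pv_startswith_ne_empty {p : String}
    (h : PySem.Str.startswith p "\"" = true) : p ≠ "" := by
  intro he
  subst he
  simp [PySem.Chars.startswith_iff] at h

theorem pv_append_comma_ne_empty (a b : String) : a ++ "," ++ b ≠ "" := by
  intro h
  have := congrArg String.toList h
  simp at this

theorem pv_collect_cons (q : String) (qs : List String) :
    pvCollect (q :: qs) =
      (if pvCloses q then some ([q], qs)
       else match pvCollect qs with
            | none => none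
            | some (sub, rest) => some (q :: sub, rest)) := rfl

-- joint loop invariant: A's foldl from an empty temp computes B's loop; from a
-- non-empty temp it computes the collect-and-join of B's inner loop
theorem pv_main (n : Nat) :
    ∀ l : List String, l.length ≤ n →
      (∀ acc : List String, (l.foldl pvStepA (acc, "")).1 = acc ++ pvAltLoop l) ∧
      (∀ (acc : List String) (temp : String), temp ≠ "" →
        (l.foldl pvStepA (acc, temp)).1 =
          match pvCollect l with
          | none => acc
          | some (sub, rest) =>
              acc ++ [PySem.Str.join "," (temp :: sub)] ++ pvAltLoop rest) := by
  induction n with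
  | zero =>
    intro l hl
    have : l = [] := List.eq_nil_of_length_eq_zero (Nat.le_zero.mp hl)
    subst this
    exact ⟨fun acc => by simp [pvAltLoop], fun acc temp _ => by simp [pvCollect]⟩
  | succ n ih =>
    intro l hl
    constructor
    · intro acc
      cases l with
      | nil => simp [pvAltLoop]
      | cons p rest =>
        have hlen : rest.length ≤ n := by simpa using hl
        simp only [List.foldl_cons, pvStepA, if_true]
        by_cases hC : (PySem.Str.startswith p "\"" &&
            (!PySem.Str.endswith p "\"" || PySem.Str.endswith p "\\\"")) = true
        · rw [if_pos hC]
          have hp : p ≠ "" :=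
            pv_startswith_ne_empty (by
              have := hC
              simp only [Bool.and_eq_true] at this
              exact this.1)
          have hB : (PySem.Str.startswith p "\"" && !pvCloses p) = true := by
            revert hC
            unfold pvCloses
            cases PySem.Str.startswith p "\"" <;>
              cases PySem.Str.endswith p "\"" <;>
              cases PySem.Str.endswith p "\\\"" <;> decide
          rw [(ih rest hlen).2 acc p hp]
          rw [pvAltLoop, if_pos hB]
          cases hcol : pvCollect rest with
          | none => simp
          | some pr => obtain ⟨sub, rest'⟩ := pr; simp
        · rw [if_neg hC]
          have hB : ¬ (PySem.Str.startswith p "\"" && !pvCloses p) = true := by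
            revert hC
            unfold pvCloses
            cases PySem.Str.startswith p "\"" <;>
              cases PySem.Str.endswith p "\"" <;>
              cases PySem.Str.endswith p "\\\"" <;> decide
          rw [(ih rest hlen).1 (acc ++ [p])]
          rw [pvAltLoop, if_neg hB]
          simp
    · intro acc temp htemp
      cases l with
      | nil => simp [pvCollect]
      | cons q qs =>
        have hlen : qs.length ≤ n := by simpa using hl
        simp only [List.foldl_cons, pvStepA, if_neg htemp]
        by_cases hcl : pvCloses q = true
        · have hcl' : (PySem.Str.endswith q "\"" && !PySem.Str.endswith q "\\\"") = true := hcl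
          rw [if_pos hcl']
          rw [(ih qs hlen).1 (acc ++ [temp ++ "," ++ q])]
          rw [pv_collect_cons, if_pos hcl]
          have : PySem.Str.join "," (temp :: [q]) = temp ++ "," ++ q := by
            rw [pv_join_step, pv_join_single]
          simp [this]
        · have hcl' : ¬ (PySem.Str.endswith q "\"" && !PySem.Str.endswith q "\\\"") = true := hcl
          rw [if_neg hcl']
          have htemp' : temp ++ "," ++ q ≠ "" := pv_append_comma_ne_empty temp q
          rw [(ih qs hlen).2 acc (temp ++ "," ++ q) htemp']
          rw [pv_collect_cons, if_neg hcl]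
          cases hcol : pvCollect qs with
          | none => simp
          | some pr =>
            obtain ⟨sub, rest⟩ := pr
            simp [pv_join_step temp q sub]

-- ===== VERDICT (by name: the statement is the Claim_ definition above) =====
theorem parse_js_one_v1_py_spec : Claim_equal_parse_js_one_v1_py := by
  intro js _
  unfold Spec_parse_js_one_v1_py
  have := (pv_main (((PySem.Str.split? js ",").getD []).map PySem.Str.strip).length
    (((PySem.Str.split? js ",").getD []).map PySem.Str.strip) le_rfl).1 []
  simpa [parse_js_one_v1_py, parse_js_one_v1_py_alt] using this
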